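-- pv_equiv track=rewrite | github.com/nihilistau/shannon-prime | tools/sp_regime_analysis.py | _is_sqfree_rich
-- ===== SOURCE A (Python) =====
-- def _is_sqfree_rich(n: int, min_distinct: int = 3) -> bool:
--     distinct = 0
--     d = n
--     for p in [2, 3, 5, 7, 11]:
--         if d % p == 0:
--             distinct += 1
--             d //= p
--             if d % p == 0:
--                 return False
--     return d == 1 and distinct >= min_distinct
-- ===== SOURCE B (Python) =====
-- def _is_sqfree_rich(n: int, min_distinct: int = 3) -> bool:
--     if n <= 0:
--         return False
--     if 2310 % n != 0:
--         return False
--     return sum(1 for p in (2, 3, 5, 7, 11) if n % p == 0) >= min_distinct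
-- ===== Notes on version B (the rewrite author's own statement) =====
-- stated objective: simpler
-- what changed: Replaces the trial-division loop with square detection by a single divisibility test against the primorial 2310 = 2*3*5*7*11 (n is squarefree with factors in the set iff n divides 2310) plus a count of the small primes dividing n.
import Mathlib
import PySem

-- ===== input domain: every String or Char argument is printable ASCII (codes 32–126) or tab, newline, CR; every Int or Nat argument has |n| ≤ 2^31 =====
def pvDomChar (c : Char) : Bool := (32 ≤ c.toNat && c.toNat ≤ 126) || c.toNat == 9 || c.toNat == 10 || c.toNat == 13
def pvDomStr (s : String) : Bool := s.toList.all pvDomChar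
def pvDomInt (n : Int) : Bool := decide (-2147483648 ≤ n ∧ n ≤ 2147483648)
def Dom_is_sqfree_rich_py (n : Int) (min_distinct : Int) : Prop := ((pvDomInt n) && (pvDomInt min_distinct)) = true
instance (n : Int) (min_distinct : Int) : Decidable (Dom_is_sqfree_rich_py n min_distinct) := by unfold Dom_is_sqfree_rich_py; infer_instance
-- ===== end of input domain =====

-- B replaces A's trial-division loop (strip each small prime once, reject a repeated factor)
-- by a single divisibility test against the primorial 2310 = 2*3*5*7*11 plus a count of the
-- small primes dividing n; objective: simpler.

-- ===== PORT A =====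
-- the for-loop of A over [2, 3, 5, 7, 11], carrying (d, distinct); the early 'return False'
-- becomes the 'false' leaf
def pvAloop (min_distinct : Int) : List Int → Int → Int → Bool
  | [], d, distinct => (d == 1) && decide (distinct ≥ min_distinct)
  | p :: ps, d, distinct =>
    if PySem.Int.mod d p == 0 then
      if PySem.Int.mod (PySem.Int.floordiv d p) p == 0 then false
      else pvAloop min_distinct ps (PySem.Int.floordiv d p) (distinct + 1)
    else pvAloop min_distinct ps d distinct

def is_sqfree_rich_py (n : Int) (min_distinct : Int) : Bool :=
  pvAloop min_distinct [2, 3, 5, 7, 11] n 0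

-- ===== PORT B =====
def is_sqfree_rich_py_alt (n : Int) (min_distinct : Int) : Bool :=
  if n ≤ 0 then false
  else if PySem.Int.mod 2310 n ≠ 0 then false
  else decide ((((([2, 3, 5, 7, 11] : List Int).filter
      (fun p => PySem.Int.mod n p == 0)).length : Int)) ≥ min_distinct)

-- ===== PRECONDITION & SPEC =====
def Spec_is_sqfree_rich_py (n : Int) (min_distinct : Int) (out : Bool) : Prop := out = is_sqfree_rich_py_alt n min_distinct
instance (n : Int) (min_distinct : Int) (out : Bool) : Decidable (Spec_is_sqfree_rich_py n min_distinct out) := by unfold Spec_is_sqfree_rich_py; infer_instance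

-- ===== CLAIM (what is proved, stated in full; the proofs are below) =====
def Claim_equal_is_sqfree_rich_py : Prop := ∀ (n : Int) (min_distinct : Int), Dom_is_sqfree_rich_py n min_distinct → Spec_is_sqfree_rich_py n min_distinct (is_sqfree_rich_py n min_distinct)

-- ===== LEMMAS AND PROOFS =====

-- a number coprime to every element of a list is coprime to its product
lemma pv_cop_prod (p : Int) (ps : List Int) (h : ∀ q ∈ ps, IsCoprime p q) :
    IsCoprime p ps.prod := by
  induction ps with
  | nil => simpa using isCoprime_one_right
  | cons q qs ih =>
    rw [List.prod_cons]
    exact (h q (by simp)).mul_right (ih fun r hr => h r (by simp [hr]))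

-- a nonpositive d can never be reduced to 1, so A's loop returns false
lemma pv_loop_neg (m : Int) : ∀ (ps : List Int), (∀ p ∈ ps, 1 < p) →
    ∀ d c : Int, d ≤ 0 → pvAloop m ps d c = false := by
  intro ps
  induction ps with
  | nil =>
    intro _ d c hd
    simp only [pvAloop]
    have h1 : (d == 1) = false := by simp; omega
    rw [h1, Bool.false_and]
  | cons p ps ih =>
    intro hpos d c hd
    have hp : 1 < p := hpos p (by simp)
    simp only [pvAloop]
    split_ifs with h1 h2
    · rfl
    · apply ih (fun q hq => hpos q (by simp [hq]))
      have hmod : PySem.Int.mod d p = 0 := by simpa using h1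
      have heq := PySem.Int.floordiv_mul_add_mod d p
      rw [hmod, add_zero] at heq
      nlinarith
    · exact ih (fun q hq => hpos q (by simp [hq])) d c hd

-- characterization of A's loop on a positive d over a list of pairwise-coprime primes:
-- it succeeds iff d divides the product of the list and enough of its elements divide d
lemma pv_loop_char (m : Int) : ∀ (ps : List Int),
    (∀ p ∈ ps, 1 < p ∧ Prime p) → ps.Pairwise (fun p q => IsCoprime p q) →
    ∀ d c : Int, 0 < d →
    (pvAloop m ps d c = true ↔
      (d ∣ ps.prod ∧ m ≤ c + ((ps.filter (fun p => PySem.Int.mod d p == 0)).length : Int))) := by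
  intro ps
  induction ps with
  | nil =>
    intro _ _ d c hd
    simp only [pvAloop, List.prod_nil, List.filter_nil, List.length_nil, Nat.cast_zero, add_zero]
    constructor
    · intro h
      simp only [Bool.and_eq_true, beq_iff_eq, decide_eq_true_iff, ge_iff_le] at h
      exact ⟨by rw [h.1], h.2⟩
    · rintro ⟨h1, h2⟩
      have hd1 : d = 1 := by
        rcases Int.isUnit_iff.mp (isUnit_of_dvd_one h1) with h | h <;> omega
      subst hd1
      simpa using h2
  | cons p ps ih =>
    intro hps hpair d c hd
    obtain ⟨hp1, hpprime⟩ := hps p (by simp)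
    have hpairc := List.pairwise_cons.mp hpair
    have hpstail : ∀ q ∈ ps, 1 < q ∧ Prime q := fun q hq => hps q (by simp [hq])
    simp only [pvAloop, List.prod_cons]
    by_cases h1 : (PySem.Int.mod d p == 0) = true
    · set d' := PySem.Int.floordiv d p with hd'def
      have hpd : p ∣ d := (PySem.Int.mod_eq_zero_iff_dvd d p).mp (by simpa using h1)
      have hdd : d' * p = d := by
        have heq := PySem.Int.floordiv_mul_add_mod d p
        rw [(by simpa using h1 : PySem.Int.mod d p = 0), add_zero] at heq
        exact heq
      have hd'pos : 0 < d' := by nlinarith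
      rw [if_pos h1]
      by_cases h2 : (PySem.Int.mod d' p == 0) = true
      · rw [if_pos h2]
        have hpd' : p ∣ d' :=
          (PySem.Int.mod_eq_zero_iff_dvd _ p).mp (by simpa using h2)
        simp only [Bool.false_eq_true, false_iff, not_and]
        intro hdvd _
        have hpp : p * p ∣ d := by
          calc p * p ∣ d' * p := mul_dvd_mul hpd' (dvd_refl p)
            _ = d := hdd
        have hpP : p ∣ ps.prod :=
          (mul_dvd_mul_iff_left hpprime.ne_zero).mp (dvd_trans hpp hdvd)
        exact absurd ((pv_cop_prod p ps hpairc.1).isUnit_of_dvd' (dvd_refl p) hpP)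
          hpprime.not_unit
      · rw [if_neg h2]
        have hq : ∀ q ∈ ps, (q ∣ d ↔ q ∣ d') := by
          intro q hqm
          constructor
          · intro hqd
            have hcq : IsCoprime q p := (hpairc.1 q hqm).symm
            rw [← hdd] at hqd
            exact hcq.dvd_of_dvd_mul_right hqd
          · intro hqd'
            rw [← hdd]
            exact Dvd.dvd.mul_right hqd' p
        have hfil : ps.filter (fun q => PySem.Int.mod d q == 0) =
            ps.filter (fun q => PySem.Int.mod d' q == 0) := by
          apply List.filter_congr
          intro q hqm
          simp only [Bool.beq_eq_decide_eq]
          exact decide_eq_decide.mpr (by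
            rw [PySem.Int.mod_eq_zero_iff_dvd, PySem.Int.mod_eq_zero_iff_dvd]
            exact hq q hqm)
        rw [ih hpstail hpairc.2 d' (c + 1) hd'pos]
        have hdvd_iff : d ∣ p * ps.prod ↔ d' ∣ ps.prod := by
          rw [← hdd, mul_comm p ps.prod]
          exact mul_dvd_mul_iff_right hpprime.ne_zero
        rw [List.filter_cons_of_pos (by simpa using h1), hdvd_iff, hfil]
        constructor
        · rintro ⟨ha, hb⟩
          refine ⟨ha, ?_⟩
          simp only [List.length_cons] at *
          push_cast at *
          omega
        · rintro ⟨ha, hb⟩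
          refine ⟨ha, ?_⟩
          simp only [List.length_cons] at *
          push_cast at *
          omega
    · rw [if_neg h1]
      have hnd : ¬ p ∣ d := fun h =>
        h1 (by simp [(PySem.Int.mod_eq_zero_iff_dvd d p).mpr h])
      have hdvd_iff : d ∣ p * ps.prod ↔ d ∣ ps.prod := by
        constructor
        · intro h
          exact ((hpprime.coprime_iff_not_dvd.mpr hnd).symm).dvd_of_dvd_mul_left h
        · intro h
          exact Dvd.dvd.mul_left h p
      rw [ih hpstail hpairc.2 d c hd,
        List.filter_cons_of_neg (by simpa using h1), hdvd_iff]

lemma pv_eq_all (n m : Int) : is_sqfree_rich_py n m = is_sqfree_rich_py_alt n m := by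
  unfold is_sqfree_rich_py is_sqfree_rich_py_alt
  by_cases hn : n ≤ 0
  · rw [if_pos hn, pv_loop_neg m [2, 3, 5, 7, 11] (by norm_num) n 0 hn]
  · have hn' : 0 < n := by omega
    rw [if_neg hn]
    have hchar := pv_loop_char m [2, 3, 5, 7, 11] (by norm_num)
      (by
        simp only [List.pairwise_cons, List.mem_cons, List.not_mem_nil,
          Int.isCoprime_iff_gcd_eq_one]
        norm_num)
      n 0 hn'
    rw [(by norm_num : ([2, 3, 5, 7, 11] : List Int).prod = 2310), zero_add] at hchar
    by_cases hd : (2310 : Int) % n = 0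
    · rw [if_neg (by rw [PySem.Int.mod_eq_emod_of_pos hn']; simpa using hd)]
      have hdvd : n ∣ 2310 := Int.dvd_of_emod_eq_zero hd
      have hiff : pvAloop m [2, 3, 5, 7, 11] n 0 = true ↔
          (decide ((((([2, 3, 5, 7, 11] : List Int).filter
            (fun p => PySem.Int.mod n p == 0)).length : Int)) ≥ m)) = true := by
        rw [hchar, decide_eq_true_iff]
        exact ⟨fun h => h.2, fun h => ⟨hdvd, h⟩⟩
      cases hA : pvAloop m [2, 3, 5, 7, 11] n 0 with
      | true => exact (hiff.mp hA).symm
      | false =>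
        cases hB : decide ((((([2, 3, 5, 7, 11] : List Int).filter
            (fun p => PySem.Int.mod n p == 0)).length : Int)) ≥ m) with
        | true => exact absurd (hiff.mpr hB) (by simp [hA])
        | false => rfl
    · rw [if_pos (by rw [PySem.Int.mod_eq_emod_of_pos hn']; simpa using hd)]
      cases hA : pvAloop m [2, 3, 5, 7, 11] n 0 with
      | true => exact absurd (Int.emod_eq_zero_of_dvd (hchar.mp hA).1) hd
      | false => rfl

-- ===== VERDICT (by name: the statement is the Claim_ definition above) =====
theorem is_sqfree_rich_py_spec : Claim_equal_is_sqfree_rich_py := by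
  intro n m _
  unfold Spec_is_sqfree_rich_py
  exact pv_eq_all n m
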